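-- pv_equiv track=rewrite | github.com/SobhanFatemi/maktab137 | week06/quiz/q1-14.py | process
-- ===== SOURCE A (Python) =====
-- def process(grades):
--     processed_grades = {'A': [], 'B': [], 'C': []}
--     for grade in grades:
--         if grade > 17:
--            processed_grades['A'].append(grade)
--         elif 12 <= grade <= 17:
--             processed_grades['B'].append(grade)
--         else:
--              processed_grades['C'].append(grade)
--     return processed_grades
-- ===== SOURCE B (Python) =====
-- def process(grades):
--     return {
--         'A': [g for g in grades if g > 17],
--         'B': [g for g in grades if 12 <= g <= 17],
--         'C': [g for g in grades if not (g > 17 or 12 <= g <= 17)],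
--     }
-- ===== Notes on version B (the rewrite author's own statement) =====
-- stated objective: simpler
-- what changed: Replaces the single stateful loop that branches and appends into a mutable dict with three independent filtering passes, one per bucket, assembled directly into the returned dict literal.
import Mathlib
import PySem

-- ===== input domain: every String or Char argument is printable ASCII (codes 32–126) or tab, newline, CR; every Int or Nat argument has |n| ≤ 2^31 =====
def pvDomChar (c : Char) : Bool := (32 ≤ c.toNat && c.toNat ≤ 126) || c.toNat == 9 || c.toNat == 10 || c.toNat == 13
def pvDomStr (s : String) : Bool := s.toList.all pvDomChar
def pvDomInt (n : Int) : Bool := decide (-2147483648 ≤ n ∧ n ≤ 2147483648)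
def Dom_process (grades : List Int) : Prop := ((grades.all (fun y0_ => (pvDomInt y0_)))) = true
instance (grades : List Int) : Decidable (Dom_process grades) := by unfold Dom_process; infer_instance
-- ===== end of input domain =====

-- B replaces the single stateful branching loop with three independent filtering passes, one per bucket (objective: simpler).
-- ===== PORT A =====
def process (grades : List Int) : List (String × List Int) :=
  grades.foldl
    (fun (d : PySem.Dict String (List Int)) grade =>
      if grade > 17 then d.modify "A" [] (· ++ [grade])
      else if 12 ≤ grade ∧ grade ≤ 17 then d.modify "B" [] (· ++ [grade])
      else d.modify "C" [] (· ++ [grade]))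
    (PySem.Dict.empty |>.insert "A" [] |>.insert "B" [] |>.insert "C" []) |>.items

-- ===== PORT B =====
def process_alt (grades : List Int) : List (String × List Int) :=
  [("A", grades.filter (fun g => g > 17)),
   ("B", grades.filter (fun g => 12 ≤ g ∧ g ≤ 17)),
   ("C", grades.filter (fun g => ¬ (g > 17 ∨ (12 ≤ g ∧ g ≤ 17))))]

-- ===== PRECONDITION & SPEC =====
def Spec_process (grades : List Int) (out : List (String × List Int)) : Prop := out = process_alt grades
instance (grades : List Int) (out : List (String × List Int)) : Decidable (Spec_process grades out) := by unfold Spec_process; infer_instance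

-- ===== CLAIM (what is proved, stated in full; the proofs are below) =====
def Claim_equal_process : Prop := ∀ (grades : List Int), Dom_process grades → Spec_process grades (process grades)

-- ===== LEMMAS AND PROOFS =====

-- ===== VERDICT (by name: the statement is the Claim_ definition above) =====
-- loop invariant: folding A's step from state [("A",a),("B",b),("C",c)] appends each bucket's filter
theorem dict_step_A (g : Int) (a b c : List Int) :
    (PySem.Dict.modify (⟨[("A", a), ("B", b), ("C", c)]⟩ : PySem.Dict String (List Int)) "A" [] (· ++ [g])) = ⟨[("A", a ++ [g]), ("B", b), ("C", c)]⟩ := by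
  simp [PySem.Dict.modify, PySem.Dict.getD, PySem.Dict.get?, PySem.Dict.insert, PySem.Dict.contains]

theorem dict_step_B (g : Int) (a b c : List Int) :
    (PySem.Dict.modify (⟨[("A", a), ("B", b), ("C", c)]⟩ : PySem.Dict String (List Int)) "B" [] (· ++ [g])) = ⟨[("A", a), ("B", b ++ [g]), ("C", c)]⟩ := by
  simp [PySem.Dict.modify, PySem.Dict.getD, PySem.Dict.get?, PySem.Dict.insert, PySem.Dict.contains]

theorem dict_step_C (g : Int) (a b c : List Int) :
    (PySem.Dict.modify (⟨[("A", a), ("B", b), ("C", c)]⟩ : PySem.Dict String (List Int)) "C" [] (· ++ [g])) = ⟨[("A", a), ("B", b), ("C", c ++ [g])]⟩ := by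
  simp [PySem.Dict.modify, PySem.Dict.getD, PySem.Dict.get?, PySem.Dict.insert, PySem.Dict.contains]

-- loop invariant: folding A's step from state [("A",a),("B",b),("C",c)] appends each bucket's filter
theorem process_loop (gs : List Int) (a b c : List Int) :
    gs.foldl
      (fun (d : PySem.Dict String (List Int)) grade =>
        if grade > 17 then d.modify "A" [] (· ++ [grade])
        else if 12 ≤ grade ∧ grade ≤ 17 then d.modify "B" [] (· ++ [grade])
        else d.modify "C" [] (· ++ [grade]))
      (⟨[("A", a), ("B", b), ("C", c)]⟩ : PySem.Dict String (List Int)) =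
    ⟨[("A", a ++ gs.filter (fun g => g > 17)),
      ("B", b ++ gs.filter (fun g => 12 ≤ g ∧ g ≤ 17)),
      ("C", c ++ gs.filter (fun g => ¬ (g > 17 ∨ (12 ≤ g ∧ g ≤ 17))))]⟩ := by
  induction gs generalizing a b c with
  | nil => simp
  | cons g gs ih =>
    rw [List.foldl_cons]
    by_cases h1 : g > 17
    · rw [if_pos h1, dict_step_A, ih]
      simp [h1]
    · by_cases h2 : 12 ≤ g ∧ g ≤ 17
      · rw [if_neg h1, if_pos h2, dict_step_B, ih]
        simp [h1, h2]
      · rw [if_neg h1, if_neg h2, dict_step_C, ih]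
        simp [List.filter_cons, h1, h2]
        omega

theorem process_spec : Claim_equal_process := by
  intro grades _
  unfold Spec_process process process_alt
  have h := congrArg PySem.Dict.items (process_loop grades [] [] [])
  simpa [PySem.Dict.empty, PySem.Dict.insert, PySem.Dict.contains] using h
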